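-- pv_equiv track=rewrite | github.com/Jayshik/Athlete_training_analytics_pipeline | training_data_pipeline/summary_generation/intervals/identify_sets.py | identify_interval_sets
-- ===== SOURCE A (Python) =====
-- def identify_interval_sets(intervals):
--     """
--     Identifies and filters interval sets based on specific criteria.
--
--     Args:
--         intervals (list): List of interval data dictionaries.
--
--     Returns:
--         tuple: Filtered intervals and new aerobic indices.
--     """
--     # Filter out intervals where intensity is 'Aerobic' and characteristic is 'Intra-Recovery'
--     filtered_intervals = [
--         interval
--         for interval in intervals
--         if not (
--             interval.get("intensity_label_v2") == "Aerobic"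
--             and interval.get("characteristic") == "Intra-Recovery"
--         )
--     ]
--
--     # Identify indices of 'Aerobic' intervals
--     aerobic_indices = [
--         i
--         for i, interval in enumerate(filtered_intervals)
--         if interval.get("intensity_label_v2") == "Aerobic"
--     ]
--
--     # Compute indices to remove based on consecutive 'Aerobic' intervals
--     indices_to_remove = []
--     if len(aerobic_indices) > 2:
--         for i in range(1, len(aerobic_indices) - 1):
--             if (aerobic_indices[i] - aerobic_indices[i - 1] == 2) and (
--                 aerobic_indices[i + 1] - aerobic_indices[i] == 2
--             ):
--                 indices_to_remove.append(aerobic_indices[i])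
--
--     # Filter out the identified indices
--     filtered_intervals = [
--         interval
--         for i, interval in enumerate(filtered_intervals)
--         if i not in indices_to_remove
--     ]
--
--     # Update 'Aerobic' indices in the filtered intervals
--     new_aerobic_indices = [
--         i
--         for i, interval in enumerate(filtered_intervals)
--         if interval.get("intensity_label_v2") == "Aerobic"
--     ]
--
--     return filtered_intervals, new_aerobic_indices
-- ===== SOURCE B (Python) =====
-- def identify_interval_sets(intervals):
--     # Drop Aerobic + Intra-Recovery intervals.
--     filtered = [
--         iv
--         for iv in intervals
--         if not (
--             iv.get("intensity_label_v2") == "Aerobic"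
--             and iv.get("characteristic") == "Intra-Recovery"
--         )
--     ]
--
--     # Boolean mask instead of an index list.
--     is_aerobic = [iv.get("intensity_label_v2") == "Aerobic" for iv in filtered]
--
--     def aero(p):
--         return 0 <= p < len(is_aerobic) and is_aerobic[p]
--
--     # A position is removed exactly when it is aerobic, its immediate
--     # neighbours are not, and the positions two away on both sides are.
--     result = [
--         iv
--         for p, iv in enumerate(filtered)
--         if not (aero(p) and aero(p - 2) and aero(p + 2)
--                 and not aero(p - 1) and not aero(p + 1))
--     ]
--
--     new_aerobic_indices = [
--         i for i, iv in enumerate(result) if iv.get("intensity_label_v2") == "Aerobic"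
--     ]
--
--     return result, new_aerobic_indices
-- ===== Notes on version B (the rewrite author's own statement) =====
-- stated objective: alternative
-- what changed: The middle stage no longer builds the list of aerobic indices and scans consecutive triples for gaps of 2, nor rescans a removal list with 'i not in indices_to_remove': B builds a boolean is_aerobic mask once and drops a position p exactly when p, p-2, p+2 are aerobic and p-1, p+1 are not (out-of-range treated as non-aerobic), a single local-window pass.
import Mathlib
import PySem

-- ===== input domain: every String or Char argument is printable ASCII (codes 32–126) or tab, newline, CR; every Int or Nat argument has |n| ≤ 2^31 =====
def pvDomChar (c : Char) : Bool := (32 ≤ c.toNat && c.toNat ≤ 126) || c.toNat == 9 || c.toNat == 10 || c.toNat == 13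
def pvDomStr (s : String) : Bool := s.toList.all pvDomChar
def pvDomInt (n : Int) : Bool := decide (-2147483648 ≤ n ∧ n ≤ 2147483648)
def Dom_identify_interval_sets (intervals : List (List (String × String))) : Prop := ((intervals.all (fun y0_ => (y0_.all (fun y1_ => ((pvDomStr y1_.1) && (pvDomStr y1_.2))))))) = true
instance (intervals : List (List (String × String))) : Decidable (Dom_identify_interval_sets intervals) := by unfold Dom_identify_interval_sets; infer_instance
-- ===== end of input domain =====

-- B replaces A's aerobic-index list, the triple-difference scan over it and the `i not in
-- indices_to_remove` membership passes by a boolean mask with one local-window test per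
-- position (objective: alternative decomposition; same return value is proved below).

-- ===== PORT A =====
-- shared helper: Python's interval.get(key) on the association list (first match, None if absent)
def pvGet (d : List (String × String)) (k : String) : Option String :=
  (d.find? (fun p => p.1 == k)).map (fun p => p.2)

-- A-side helper: A's `indices_to_remove` block (the len > 2 guard and the loop over range(1, len-1))
def pvRemoveA (aerobic_indices : List Int) : List Int :=
  if ((aerobic_indices.length : Int) > 2) then
    (PySem.List.pyRange 1 ((aerobic_indices.length : Int) - 1) 1).foldl
      (fun acc i =>
        if (PySem.List.pyGetD aerobic_indices i 0 - PySem.List.pyGetD aerobic_indices (i - 1) 0 == 2)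
            && (PySem.List.pyGetD aerobic_indices (i + 1) 0 - PySem.List.pyGetD aerobic_indices i 0 == 2)
        then acc ++ [PySem.List.pyGetD aerobic_indices i 0] else acc) []
  else []

def identify_interval_sets (intervals : List (List (String × String))) : (List (List (String × String))) × List Int :=
  let filtered_intervals := intervals.filter (fun interval =>
    !(pvGet interval "intensity_label_v2" == some "Aerobic"
      && pvGet interval "characteristic" == some "Intra-Recovery"))
  let aerobic_indices : List Int :=
    ((PySem.List.enumerate filtered_intervals).filter
      (fun p => pvGet p.2 "intensity_label_v2" == some "Aerobic")).map (fun p => p.1)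
  let indices_to_remove := pvRemoveA aerobic_indices
  let filtered_intervals2 :=
    ((PySem.List.enumerate filtered_intervals).filter
      (fun p => !(indices_to_remove.contains p.1))).map (fun p => p.2)
  let new_aerobic_indices : List Int :=
    ((PySem.List.enumerate filtered_intervals2).filter
      (fun p => pvGet p.2 "intensity_label_v2" == some "Aerobic")).map (fun p => p.1)
  (filtered_intervals2, new_aerobic_indices)

-- ===== PORT B =====
-- B-side helper: aero(p) = 0 <= p < len(is_aerobic) and is_aerobic[p]
def pvAero (is_aerobic : List Bool) (p : Int) : Bool :=
  decide (0 ≤ p) && decide (p < (is_aerobic.length : Int)) && is_aerobic.getD p.toNat false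

def identify_interval_sets_alt (intervals : List (List (String × String))) : (List (List (String × String))) × List Int :=
  let filtered := intervals.filter (fun interval =>
    !(pvGet interval "intensity_label_v2" == some "Aerobic"
      && pvGet interval "characteristic" == some "Intra-Recovery"))
  let is_aerobic : List Bool := filtered.map (fun iv => pvGet iv "intensity_label_v2" == some "Aerobic")
  let result :=
    ((PySem.List.enumerate filtered).filter (fun q =>
      !(pvAero is_aerobic q.1 && pvAero is_aerobic (q.1 - 2) && pvAero is_aerobic (q.1 + 2)
        && !pvAero is_aerobic (q.1 - 1) && !pvAero is_aerobic (q.1 + 1)))).map (fun q => q.2)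
  let new_aerobic_indices : List Int :=
    ((PySem.List.enumerate result).filter
      (fun p => pvGet p.2 "intensity_label_v2" == some "Aerobic")).map (fun p => p.1)
  (result, new_aerobic_indices)

-- ===== PRECONDITION & SPEC =====
def Spec_identify_interval_sets (intervals : List (List (String × String))) (out : (List (List (String × String))) × List Int) : Prop := out = identify_interval_sets_alt intervals
instance (intervals : List (List (String × String))) (out : (List (List (String × String))) × List Int) : Decidable (Spec_identify_interval_sets intervals out) := by unfold Spec_identify_interval_sets; infer_instance

-- ===== CLAIM (what is proved, stated in full; the proofs are below) =====
def Claim_equal_identify_interval_sets : Prop := ∀ (intervals : List (List (String × String))), Dom_identify_interval_sets intervals → Spec_identify_interval_sets intervals (identify_interval_sets intervals)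

-- ===== LEMMAS AND PROOFS =====

-- positions of `true` in a boolean mask, in increasing order
def tpos : List Bool → List Nat
  | [] => []
  | b :: bs => (if b then [0] else []) ++ (tpos bs).map (· + 1)

lemma enum_filter_map {α : Type} (xs : List α) (pr : α → Bool) (s : Int) :
    ((PySem.List.enumerate xs s).filter (fun p => pr p.2)).map (fun p => p.1)
      = (tpos (xs.map pr)).map (fun n : Nat => s + (n : Int)) := by
  induction xs generalizing s with
  | nil => simp [tpos, PySem.List.enumerate_nil]
  | cons x t ih =>
    have key : ((tpos (t.map pr)).map (· + 1)).map (fun n : Nat => s + (n : Int))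
        = (tpos (t.map pr)).map (fun n : Nat => (s + 1) + (n : Int)) := by
      rw [List.map_map]
      refine List.map_congr_left (fun n _ => ?_)
      show s + ((n + 1 : Nat) : Int) = (s + 1) + (n : Int)
      push_cast; ring
    rw [PySem.List.enumerate_cons, List.filter_cons, List.map_cons,
      show tpos (pr x :: t.map pr) = (if pr x then [0] else []) ++ (tpos (t.map pr)).map (· + 1) from rfl]
    cases h : pr x
    · simp only [Bool.false_eq_true, if_false, List.nil_append]
      rw [ih (s + 1), key]
    · simp only [if_true, List.map_cons, List.cons_append, List.nil_append]
      rw [ih (s + 1), key]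
      norm_num

lemma mem_tpos (bs : List Bool) (k : Nat) : k ∈ tpos bs ↔ bs.getD k false = true := by
  induction bs generalizing k with
  | nil => simp [tpos]
  | cons b t ih =>
    cases k with
    | zero => cases b <;> simp [tpos]
    | succ m => cases b <;> simp [tpos, ih]

lemma tpos_pairwise (bs : List Bool) : (tpos bs).Pairwise (· < ·) := by
  induction bs with
  | nil => simp [tpos]
  | cons b t ih =>
    simp only [tpos]
    refine List.pairwise_append.2 ⟨?_, ?_, ?_⟩
    · cases b <;> simp
    · exact (List.pairwise_map).2 (ih.imp (by omega))
    · intro x hx y hy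
      cases b <;> simp_all
      omega

lemma adj_iff (l : List Nat) (hs : l.Pairwise (· < ·)) (a b : Nat) (hab : a < b) :
    (∃ i : Nat, l[i]? = some a ∧ l[i+1]? = some b)
      ↔ (a ∈ l ∧ b ∈ l ∧ ∀ c ∈ l, ¬(a < c ∧ c < b)) := by
  have hmono : ∀ (i j a' b' : Nat), l[i]? = some a' → l[j]? = some b' → i < j → a' < b' := by
    intro i j a' b' ha' hb' hij
    rw [List.getElem?_eq_some_iff] at ha' hb'
    obtain ⟨hi1, hi2⟩ := ha'; obtain ⟨hj1, hj2⟩ := hb'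
    rw [← hi2, ← hj2]
    exact List.pairwise_iff_getElem.1 hs i j hi1 hj1 hij
  constructor
  · rintro ⟨i, hia, hib⟩
    have hma : a ∈ l := List.mem_of_getElem? hia
    have hmb : b ∈ l := List.mem_of_getElem? hib
    refine ⟨hma, hmb, ?_⟩
    rintro c hc ⟨hc1, hc2⟩
    obtain ⟨j, hcj⟩ := List.getElem?_of_mem hc
    rcases Nat.lt_trichotomy j i with h | h | h
    · have := hmono j i c a hcj hia h; omega
    · rw [h, hia] at hcj; have := Option.some.inj hcj; omega
    · rcases Nat.lt_trichotomy j (i+1) with h' | h' | h'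
      · omega
      · rw [h', hib] at hcj; have := Option.some.inj hcj; omega
      · have := hmono (i+1) j b c hib hcj h'; omega
  · rintro ⟨ha, hb, hbetween⟩
    obtain ⟨i, hia⟩ := List.getElem?_of_mem ha
    obtain ⟨j, hjb⟩ := List.getElem?_of_mem hb
    have hij : i < j := by
      rcases Nat.lt_trichotomy i j with h | h | h
      · exact h
      · rw [← h, hia] at hjb; have := Option.some.inj hjb; omega
      · have := hmono j i b a hjb hia h; omega
    have hlen : j < l.length := (List.getElem?_eq_some_iff.1 hjb).1
    have hji : j = i + 1 := by
      by_contra hne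
      have h2 : i + 1 < l.length := by omega
      have hmid : l[i+1]? = some l[i+1] := List.getElem?_eq_getElem h2
      have hlt1 := hmono i (i+1) a l[i+1] hia hmid (by omega)
      have hlt2 := hmono (i+1) j l[i+1] b hmid hjb (by omega)
      exact hbetween l[i+1] (List.getElem_mem h2) ⟨hlt1, hlt2⟩
    exact ⟨i, hia, by rw [← hji]; exact hjb⟩

lemma getElem?_inj_of_pairwise_lt (l : List Nat) (hs : l.Pairwise (· < ·)) {i j k : Nat}
    (hi : l[i]? = some k) (hj : l[j]? = some k) : i = j := by
  rw [List.getElem?_eq_some_iff] at hi hj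
  obtain ⟨hi1, hi2⟩ := hi; obtain ⟨hj1, hj2⟩ := hj
  rcases Nat.lt_trichotomy i j with h | h | h
  · have hlt := List.pairwise_iff_getElem.1 hs i j hi1 hj1 h
    rw [hi2, hj2] at hlt; omega
  · exact h
  · have hlt := List.pairwise_iff_getElem.1 hs j i hj1 hi1 h
    rw [hi2, hj2] at hlt; omega

lemma mem_pvRemoveA (aer : List Int) (x : Int) :
    x ∈ pvRemoveA aer ↔ ∃ i : Int, (1 ≤ i ∧ i < (aer.length : Int) - 1)
      ∧ (PySem.List.pyGetD aer i 0 - PySem.List.pyGetD aer (i - 1) 0 = 2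
          ∧ PySem.List.pyGetD aer (i + 1) 0 - PySem.List.pyGetD aer i 0 = 2)
      ∧ x = PySem.List.pyGetD aer i 0 := by
  unfold pvRemoveA
  split
  · rw [PySem.List.foldl_append_if]
    simp [List.mem_filter, PySem.List.mem_pyRange_one]
    constructor
    · rintro ⟨i, ⟨⟨h1, h2⟩, hc⟩, hx⟩
      exact ⟨i, ⟨h1, h2⟩, ⟨by simpa using hc.1, by simpa using hc.2⟩, hx.symm⟩
    · rintro ⟨i, ⟨h1, h2⟩, ⟨hc1, hc2⟩, hx⟩
      exact ⟨i, ⟨⟨h1, h2⟩, by simp [hc1, hc2]⟩, hx.symm⟩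
  · rename_i hle
    simp only [List.not_mem_nil, false_iff]
    rintro ⟨i, ⟨h1, h2⟩, _⟩
    omega

lemma step1 (tl : List Nat) (k : Nat) :
    ((k : Int) ∈ pvRemoveA (tl.map (fun n : Nat => (n : Int)))) ↔
      ∃ j : Nat, 1 ≤ j ∧ j + 1 < tl.length ∧ 2 ≤ k
        ∧ tl[j-1]? = some (k-2) ∧ tl[j]? = some k ∧ tl[j+1]? = some (k+2) := by
  rw [mem_pvRemoveA]
  have hlen : (tl.map (fun n : Nat => (n : Int))).length = tl.length := List.length_map _
  constructor
  · rintro ⟨i, ⟨h1, h2⟩, ⟨hd1, hd2⟩, hk⟩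
    rw [hlen] at h2
    rw [@PySem.List.pyGetD_eq_getElem _ _ i 0 (by omega) (by rw [hlen]; omega)] at hd1 hd2 hk
    rw [@PySem.List.pyGetD_eq_getElem _ _ (i-1) 0 (by omega) (by rw [hlen]; omega)] at hd1
    rw [@PySem.List.pyGetD_eq_getElem _ _ (i+1) 0 (by omega) (by rw [hlen]; omega)] at hd2
    set j := i.toNat with hj
    have e1 : (i - 1).toNat = j - 1 := by omega
    have e2 : (i + 1).toNat = j + 1 := by omega
    simp only [e1] at hd1; simp only [e2] at hd2
    have g0 : j - 1 < tl.length := by omega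
    have g1 : j < tl.length := by omega
    have g2 : j + 1 < tl.length := by omega
    rw [List.getElem_map, List.getElem_map] at hd1 hd2
    rw [List.getElem_map] at hk
    have hk' : tl[j] = k := by exact_mod_cast hk.symm
    have h2k : 2 ≤ k := by omega
    refine ⟨j, by omega, g2, h2k, ?_, ?_, ?_⟩
    · rw [List.getElem?_eq_getElem g0]; congr 1; omega
    · rw [List.getElem?_eq_getElem g1, hk']
    · rw [List.getElem?_eq_getElem g2]; congr 1; omega
  · rintro ⟨j, hj1, hj2, h2k, ha, hb, hc⟩
    rw [List.getElem?_eq_some_iff] at ha hb hc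
    obtain ⟨ha1, ha2⟩ := ha; obtain ⟨hb1, hb2⟩ := hb; obtain ⟨hc1, hc2⟩ := hc
    have e0 : ((j : Int)).toNat = j := by omega
    have e1 : ((j : Int) - 1).toNat = j - 1 := by omega
    have e2 : ((j : Int) + 1).toNat = j + 1 := by omega
    refine ⟨(j : Int), ⟨by omega, by rw [hlen]; omega⟩, ⟨?_, ?_⟩, ?_⟩
    · rw [@PySem.List.pyGetD_eq_getElem _ _ ((j:Int)) 0 (by omega) (by rw [hlen]; omega),
        @PySem.List.pyGetD_eq_getElem _ _ ((j:Int)-1) 0 (by omega) (by rw [hlen]; omega)]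
      simp only [e0, e1, List.getElem_map, ha2, hb2]
      omega
    · rw [@PySem.List.pyGetD_eq_getElem _ _ ((j:Int)+1) 0 (by omega) (by rw [hlen]; omega),
        @PySem.List.pyGetD_eq_getElem _ _ ((j:Int)) 0 (by omega) (by rw [hlen]; omega)]
      simp only [e0, e2, List.getElem_map, hb2, hc2]
      omega
    · rw [@PySem.List.pyGetD_eq_getElem _ _ ((j:Int)) 0 (by omega) (by rw [hlen]; omega)]
      simp only [e0, List.getElem_map, hb2]

lemma mem_pvRemoveA_tpos (mask : List Bool) (k : Nat) :
    ((k : Int) ∈ pvRemoveA ((tpos mask).map (fun n : Nat => (n : Int))))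
      ↔ (2 ≤ k ∧ mask.getD (k-2) false = true ∧ mask.getD k false = true
          ∧ mask.getD (k+2) false = true ∧ mask.getD (k-1) false = false
          ∧ mask.getD (k+1) false = false) := by
  rw [step1]
  have hs := tpos_pairwise mask
  constructor
  · rintro ⟨j, hj1, hj2, h2k, ha, hb, hc⟩
    have e : j - 1 + 1 = j := by omega
    have adj1 : ∃ i, (tpos mask)[i]? = some (k-2) ∧ (tpos mask)[i+1]? = some k :=
      ⟨j - 1, ha, by rw [e]; exact hb⟩
    have adj2 : ∃ i, (tpos mask)[i]? = some k ∧ (tpos mask)[i+1]? = some (k+2) := ⟨j, hb, hc⟩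
    rw [adj_iff _ hs _ _ (by omega)] at adj1
    rw [adj_iff _ hs _ _ (by omega)] at adj2
    obtain ⟨m1, m2, nb1⟩ := adj1; obtain ⟨_, m3, nb2⟩ := adj2
    refine ⟨h2k, (mem_tpos _ _).1 m1, (mem_tpos _ _).1 m2, (mem_tpos _ _).1 m3, ?_, ?_⟩
    · by_contra h
      have hmem : k - 1 ∈ tpos mask := (mem_tpos _ _).2 (by
        revert h; cases mask.getD (k-1) false <;> simp)
      exact nb1 _ hmem ⟨by omega, by omega⟩
    · by_contra h
      have hmem : k + 1 ∈ tpos mask := (mem_tpos _ _).2 (by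
        revert h; cases mask.getD (k+1) false <;> simp)
      exact nb2 _ hmem ⟨by omega, by omega⟩
  · rintro ⟨h2k, hm2, hm0, hp2, hf1, hf2⟩
    have adj1 : ∃ i, (tpos mask)[i]? = some (k-2) ∧ (tpos mask)[i+1]? = some k := by
      rw [adj_iff _ hs _ _ (by omega)]
      refine ⟨(mem_tpos _ _).2 hm2, (mem_tpos _ _).2 hm0, ?_⟩
      rintro c hcin ⟨hc1, hc2⟩
      have hck : c = k - 1 := by omega
      rw [mem_tpos, hck, hf1] at hcin
      exact absurd hcin (by simp)
    have adj2 : ∃ i, (tpos mask)[i]? = some k ∧ (tpos mask)[i+1]? = some (k+2) := by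
      rw [adj_iff _ hs _ _ (by omega)]
      refine ⟨(mem_tpos _ _).2 hm0, (mem_tpos _ _).2 hp2, ?_⟩
      rintro c hcin ⟨hc1, hc2⟩
      have hck : c = k + 1 := by omega
      rw [mem_tpos, hck, hf2] at hcin
      exact absurd hcin (by simp)
    obtain ⟨i1, h1a, h1b⟩ := adj1
    obtain ⟨i2, h2a, h2b⟩ := adj2
    have hii : i1 + 1 = i2 := getElem?_inj_of_pairwise_lt _ hs h1b h2a
    have hlen : i2 + 1 < (tpos mask).length := (List.getElem?_eq_some_iff.1 h2b).1
    refine ⟨i2, by omega, hlen, h2k, ?_, h2a, h2b⟩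
    have e : i2 - 1 = i1 := by omega
    rw [e]; exact h1a

lemma bridge (M : List Bool) (kk : Nat) (hk : kk < M.length) :
    (pvAero M (kk:Int) && pvAero M ((kk:Int)-2) && pvAero M ((kk:Int)+2)
      && !pvAero M ((kk:Int)-1) && !pvAero M ((kk:Int)+1)) = true
    ↔ (2 ≤ kk ∧ M.getD (kk-2) false = true ∧ M.getD kk false = true
        ∧ M.getD (kk+2) false = true ∧ M.getD (kk-1) false = false
        ∧ M.getD (kk+1) false = false) := by
  have e0 : ((kk:Int)).toNat = kk := by omega
  have e3 : ((kk:Int)+1).toNat = kk+1 := by omega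
  have e4 : ((kk:Int)+2).toNat = kk+2 := by omega
  by_cases h2 : 2 ≤ kk
  · have e1 : ((kk:Int)-1).toNat = kk-1 := by omega
    have e2 : ((kk:Int)-2).toNat = kk-2 := by omega
    have hb2 : M.getD (kk+2) false = true → kk+2 < M.length := by
      intro h; by_contra hh
      rw [List.getD_eq_default _ _ (by omega)] at h; cases h
    simp only [pvAero, e0, e1, e2, e3, e4, Bool.and_eq_true, Bool.not_eq_true',
      Bool.and_eq_false_iff, decide_eq_true_eq, decide_eq_false_iff_not]
    constructor
    · rintro ⟨⟨⟨⟨⟨⟨-, -⟩, hm0⟩, ⟨-, -⟩, hm2⟩, ⟨-, -⟩, hp2⟩, hn1⟩, hn2⟩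
      refine ⟨h2, hm2, hm0, hp2, ?_, ?_⟩
      · rcases hn1 with (h | h) | h
        · omega
        · omega
        · exact h
      · rcases hn2 with (h | h) | h
        · omega
        · exact List.getD_eq_default _ _ (by omega)
        · exact h
    · rintro ⟨-, hm2, hm0, hp2, hf1, hf2⟩
      have hlt2 : kk + 2 < M.length := hb2 hp2
      exact ⟨⟨⟨⟨⟨⟨by omega, by omega⟩, hm0⟩, ⟨by omega, by omega⟩, hm2⟩,
        ⟨by omega, by omega⟩, hp2⟩, Or.inr hf1⟩, Or.inr hf2⟩
  · simp only [pvAero, e0, e3, e4, Bool.and_eq_true, Bool.not_eq_true',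
      Bool.and_eq_false_iff, decide_eq_true_eq, decide_eq_false_iff_not]
    constructor
    · rintro ⟨⟨⟨⟨-, ⟨h0, -⟩, -⟩, -⟩, -⟩, -⟩
      omega
    · rintro ⟨hc, -⟩
      omega

lemma enum_filter_map0 {α : Type} (xs : List α) (pr : α → Bool) :
    ((PySem.List.enumerate xs 0).filter (fun p => pr p.2)).map (fun p => p.1)
      = (tpos (xs.map pr)).map (fun n : Nat => (n : Int)) := by
  rw [enum_filter_map]
  exact List.map_congr_left (fun n _ => by omega)

lemma filter_eq (F : List (List (String × String))) :
    (PySem.List.enumerate F 0).filter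
        (fun p => !((pvRemoveA (((PySem.List.enumerate F 0).filter
            (fun p => pvGet p.2 "intensity_label_v2" == some "Aerobic")).map (fun p => p.1))).contains p.1))
      = (PySem.List.enumerate F 0).filter (fun q =>
          !(pvAero (F.map (fun iv => pvGet iv "intensity_label_v2" == some "Aerobic")) q.1
            && pvAero (F.map (fun iv => pvGet iv "intensity_label_v2" == some "Aerobic")) (q.1 - 2)
            && pvAero (F.map (fun iv => pvGet iv "intensity_label_v2" == some "Aerobic")) (q.1 + 2)
            && !pvAero (F.map (fun iv => pvGet iv "intensity_label_v2" == some "Aerobic")) (q.1 - 1)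
            && !pvAero (F.map (fun iv => pvGet iv "intensity_label_v2" == some "Aerobic")) (q.1 + 1))) := by
  have haer : ((PySem.List.enumerate F 0).filter
        (fun p => pvGet p.2 "intensity_label_v2" == some "Aerobic")).map (fun p => p.1)
      = (tpos (F.map (fun iv => pvGet iv "intensity_label_v2" == some "Aerobic"))).map
          (fun n : Nat => (n : Int)) :=
    enum_filter_map0 F (fun iv => pvGet iv "intensity_label_v2" == some "Aerobic")
  rw [haer]
  apply List.filter_congr
  intro q hq
  obtain ⟨kk, hkk, rfl⟩ := (PySem.List.mem_enumerate_iff _ _ _).1 hq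
  simp only [zero_add]
  congr 1
  have hkM : kk < (F.map (fun iv => pvGet iv "intensity_label_v2" == some "Aerobic")).length := by
    rw [List.length_map]; exact hkk
  apply Bool.coe_iff_coe.mp
  rw [List.contains_iff_mem, mem_pvRemoveA_tpos, bridge _ _ hkM]

-- ===== VERDICT (by name: the statement is the Claim_ definition above) =====
theorem identify_interval_sets_spec : Claim_equal_identify_interval_sets := by
  intro intervals _
  unfold Spec_identify_interval_sets
  simp only [identify_interval_sets, identify_interval_sets_alt]
  rw [filter_eq]
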